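-- pv_equiv track=rewrite | github.com/tommygood/clinic | sql/medicines.py | ckSpace
-- ===== SOURCE A (Python) =====
-- def ckSpace(data) :
--     n_data = ""
--     for i in range(len(data)) :
--         if i == len(data)-1 :
--             if data[i] == " " :
--                 break
--             else :
--                 n_data += data[i]
--                 break
--         if i == 0 and data[i] == " " : # 第一個為空白
--             continue
--         else :
--             if data[i] == " " and (data[i-1] == " " or data[i+1] == " ") :
--                 continue
--             else :
--                 n_data += data[i]
--     return n_data
-- ===== SOURCE B (Python) =====
-- def ckSpace(data):
--     # Run-based scan: split data into maximal runs of equal characters.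
--     # Non-space runs are kept whole; a space run is kept as a single ' '
--     # only when it has length 1 and is strictly interior.
--     n = len(data)
--     out = []
--     i = 0
--     while i < n:
--         j = i
--         while j < n and data[j] == data[i]:
--             j += 1
--         if data[i] != " ":
--             out.append(data[i] * (j - i))
--         elif j - i == 1 and i > 0 and j < n:
--             out.append(" ")
--         i = j
--     return "".join(out)
-- ===== Notes on version B (the rewrite author's own statement) =====
-- stated objective: alternative
-- what changed: Replaces A's per-index loop with neighbour lookups by a two-pointer scan over maximal runs of equal characters: non-space runs are copied whole, a space run survives as a single space only if it has length 1 and is strictly interior.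
import Mathlib
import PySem

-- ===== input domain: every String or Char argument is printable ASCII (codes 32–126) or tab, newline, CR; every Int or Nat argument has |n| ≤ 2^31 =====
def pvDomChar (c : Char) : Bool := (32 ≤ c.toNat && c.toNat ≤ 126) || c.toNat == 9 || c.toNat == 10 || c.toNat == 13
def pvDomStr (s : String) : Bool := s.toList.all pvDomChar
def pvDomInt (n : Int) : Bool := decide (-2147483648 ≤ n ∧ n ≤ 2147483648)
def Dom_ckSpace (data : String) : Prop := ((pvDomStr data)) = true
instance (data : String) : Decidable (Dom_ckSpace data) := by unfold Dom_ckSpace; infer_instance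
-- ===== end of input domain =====

-- B replaces A's per-index neighbour checks by a two-pointer scan over maximal runs of equal characters (objective: alternative, same cost).

-- ===== PORT A =====
-- Literal port of A's index loop; the fuel argument (= number of remaining indices) only makes the
-- recursion structural.  All data[i]/data[i+1] accesses are in range; the data[i-1] access is read
-- only when data[i] = ' ' (Python's short-circuit `and`), which at i = 0 is impossible in that
-- branch, so Python's negative wraparound there is unobservable and getD is exact.
def ckSpaceA (cs : List Char) : Nat → Nat → List Char → List Char
  | 0, _, acc => acc
  | f+1, i, acc =>
    if i < cs.length then
      if i = cs.length - 1 then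
        if cs.getD i ' ' = ' ' then acc else acc ++ [cs.getD i ' ']       -- break
      else if i = 0 ∧ cs.getD i ' ' = ' ' then ckSpaceA cs f (i+1) acc   -- continue
      else if cs.getD i ' ' = ' ' ∧ (cs.getD (i-1) ' ' = ' ' ∨ cs.getD (i+1) ' ' = ' ') then
        ckSpaceA cs f (i+1) acc                                           -- continue
      else ckSpaceA cs f (i+1) (acc ++ [cs.getD i ' '])
    else acc

def ckSpace (data : String) : String :=
  String.ofList (ckSpaceA data.toList data.toList.length 0 [])

-- ===== PORT B =====
-- inner `while j < n and data[j] == data[i]` loop of Source B (fuel = remaining indices)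
def runEnd (cs : List Char) (c : Char) : Nat → Nat → Nat
  | 0, j => j
  | f+1, j => if j < cs.length ∧ cs.getD j ' ' = c then runEnd cs c f (j+1) else j

-- outer while loop of Source B
def ckSpaceB (cs : List Char) : Nat → Nat → List Char → List Char
  | 0, _, acc => acc
  | f+1, i, acc =>
    if i < cs.length then
      ckSpaceB cs f (runEnd cs (cs.getD i ' ') (cs.length - i) i)
        (if cs.getD i ' ' ≠ ' ' then
           acc ++ List.replicate (runEnd cs (cs.getD i ' ') (cs.length - i) i - i) (cs.getD i ' ')
         else if runEnd cs (cs.getD i ' ') (cs.length - i) i - i = 1 ∧ 0 < i ∧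
                 runEnd cs (cs.getD i ' ') (cs.length - i) i < cs.length then
           acc ++ [' ']
         else acc)
    else acc

def ckSpace_alt (data : String) : String :=
  String.ofList (ckSpaceB data.toList data.toList.length 0 [])

-- ===== PRECONDITION & SPEC =====
def Spec_ckSpace (data : String) (out : String) : Prop := out = ckSpace_alt data
instance (data : String) (out : String) : Decidable (Spec_ckSpace data out) := by unfold Spec_ckSpace; infer_instance

-- ===== CLAIM (what is proved, stated in full; the proofs are below) =====
def Claim_equal_ckSpace : Prop := ∀ (data : String), Dom_ckSpace data → Spec_ckSpace data (ckSpace data)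

-- ===== LEMMAS AND PROOFS =====

-- common characterisation: index i of cs is kept iff it is a non-space, or a strictly interior
-- space with non-space neighbours on both sides
def keepIdx (cs : List Char) (i : Nat) : Bool :=
  (cs.getD i ' ' != ' ') ||
    (decide (0 < i) && decide (i + 1 < cs.length) &&
     (cs.getD (i-1) ' ' != ' ') && (cs.getD (i+1) ' ' != ' '))

theorem keepIdx_iff (cs : List Char) (i : Nat) :
    keepIdx cs i = true ↔
      (cs.getD i ' ' ≠ ' ' ∨
       (0 < i ∧ i + 1 < cs.length ∧ cs.getD (i-1) ' ' ≠ ' ' ∧ cs.getD (i+1) ' ' ≠ ' ')) := by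
  simp [keepIdx, List.getD]
  tauto

theorem keepIdx_false_iff (cs : List Char) (i : Nat) :
    keepIdx cs i = false ↔
      ¬ (cs.getD i ' ' ≠ ' ' ∨
         (0 < i ∧ i + 1 < cs.length ∧ cs.getD (i-1) ' ' ≠ ' ' ∧ cs.getD (i+1) ' ' ≠ ' ')) := by
  rw [← keepIdx_iff]
  cases keepIdx cs i <;> simp

def specF (cs : List Char) : Nat → Nat → List Char
  | 0, _ => []
  | f+1, i =>
    if i < cs.length then
      (if keepIdx cs i then [cs.getD i ' '] else []) ++ specF cs f (i+1)
    else []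

theorem specF_stop (cs : List Char) (f i : Nat) (h : ¬ i < cs.length) : specF cs f i = [] := by
  cases f with
  | zero => rfl
  | succ f => rw [specF, if_neg h]

theorem specF_keep (cs : List Char) (f i : Nat) (h : i < cs.length) (hk : keepIdx cs i = true) :
    specF cs (f+1) i = cs.getD i ' ' :: specF cs f (i+1) := by
  rw [specF, if_pos h, hk]; rfl

theorem specF_drop (cs : List Char) (f i : Nat) (h : i < cs.length) (hk : keepIdx cs i = false) :
    specF cs (f+1) i = specF cs f (i+1) := by
  rw [specF, if_pos h, hk]; rfl

theorem specF_congr (cs : List Char) :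
    ∀ f1 f2 i, cs.length - i ≤ f1 → cs.length - i ≤ f2 → specF cs f1 i = specF cs f2 i := by
  intro f1
  induction f1 with
  | zero =>
    intro f2 i h1 _
    rw [specF_stop cs 0 i (by omega), specF_stop cs f2 i (by omega)]
  | succ g ih =>
    intro f2 i h1 h2
    by_cases h : i < cs.length
    · cases f2 with
      | zero => omega
      | succ g2 =>
        rw [specF, specF, if_pos h, if_pos h,
            ih g2 (i+1) (by omega) (by omega)]
    · rw [specF_stop cs _ i h, specF_stop cs f2 i h]

-- A's loop computes specF
theorem ckSpaceA_eq (cs : List Char) :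
    ∀ f i acc, cs.length - i ≤ f → ckSpaceA cs f i acc = acc ++ specF cs f i := by
  intro f
  induction f with
  | zero =>
    intro i acc h
    rw [ckSpaceA, specF, List.append_nil]
  | succ f ih =>
    intro i acc hf
    by_cases h : i < cs.length
    · rw [ckSpaceA, if_pos h]
      by_cases hlast : i = cs.length - 1
      · rw [if_pos hlast]
        by_cases hsp : cs.getD i ' ' = ' '
        · rw [if_pos hsp]
          have hk : keepIdx cs i = false := by
            rw [keepIdx_false_iff]; push_neg
            exact ⟨hsp, fun _ hlen _ => absurd hlen (by omega)⟩
          rw [specF_drop cs f i h hk, specF_stop cs f (i+1) (by omega), List.append_nil]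
        · rw [if_neg hsp]
          have hk : keepIdx cs i = true := (keepIdx_iff cs i).mpr (Or.inl hsp)
          rw [specF_keep cs f i h hk, specF_stop cs f (i+1) (by omega)]
      · rw [if_neg hlast]
        by_cases hz : i = 0 ∧ cs.getD i ' ' = ' '
        · rw [if_pos hz]
          have hk : keepIdx cs i = false := by
            rw [keepIdx_false_iff]; push_neg
            exact ⟨hz.2, fun h0 _ _ => absurd hz.1 (by omega)⟩
          rw [ih (i+1) acc (by omega), specF_drop cs f i h hk]
        · rw [if_neg hz]
          by_cases hnb : cs.getD i ' ' = ' ' ∧ (cs.getD (i-1) ' ' = ' ' ∨ cs.getD (i+1) ' ' = ' ')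
          · rw [if_pos hnb]
            have hk : keepIdx cs i = false := by
              rw [keepIdx_false_iff]; push_neg
              refine ⟨hnb.1, fun _ _ hp => ?_⟩
              rcases hnb.2 with h1 | h1
              · exact absurd h1 hp
              · exact h1
            rw [ih (i+1) acc (by omega), specF_drop cs f i h hk]
          · rw [if_neg hnb]
            have hk : keepIdx cs i = true := by
              rw [keepIdx_iff]
              by_cases hsp : cs.getD i ' ' = ' '
              · right
                have h0 : 0 < i := by
                  rcases Nat.eq_zero_or_pos i with h0 | h0
                  · exact absurd ⟨h0, hsp⟩ hz
                  · exact h0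
                have hor : ¬ (cs.getD (i-1) ' ' = ' ' ∨ cs.getD (i+1) ' ' = ' ') :=
                  fun hor => hnb ⟨hsp, hor⟩
                push_neg at hor
                exact ⟨h0, by omega, hor.1, hor.2⟩
              · exact Or.inl hsp
            rw [ih (i+1) (acc ++ [cs.getD i ' ']) (by omega), specF_keep cs f i h hk]
            simp
    · rw [ckSpaceA, if_neg h, specF_stop cs _ i h, List.append_nil]

-- runEnd facts
theorem runEnd_ge (cs : List Char) (c : Char) :
    ∀ f j, j ≤ runEnd cs c f j := by
  intro f
  induction f with
  | zero => intro j; rw [runEnd]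
  | succ f ih =>
    intro j
    rw [runEnd]
    split
    · have := ih (j+1); omega
    · omega

theorem runEnd_le (cs : List Char) (c : Char) :
    ∀ f j, j ≤ cs.length → runEnd cs c f j ≤ cs.length := by
  intro f
  induction f with
  | zero => intro j h; rw [runEnd]; exact h
  | succ f ih =>
    intro j h
    rw [runEnd]
    split
    · next hc => exact ih (j+1) (by omega)
    · exact h

theorem runEnd_mem (cs : List Char) (c : Char) :
    ∀ f j k, j ≤ k → k < runEnd cs c f j → cs.getD k ' ' = c := by
  intro f
  induction f with
  | zero => intro j k h1 h2; rw [runEnd] at h2; omega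
  | succ f ih =>
    intro j k h1 h2
    rw [runEnd] at h2
    split at h2
    · next hc =>
      rcases Nat.eq_or_lt_of_le h1 with rfl | hlt
      · exact hc.2
      · exact ih (j+1) k hlt h2
    · omega

theorem runEnd_stop (cs : List Char) (c : Char) :
    ∀ f j, cs.length - j ≤ f → runEnd cs c f j < cs.length →
    cs.getD (runEnd cs c f j) ' ' ≠ c := by
  intro f
  induction f with
  | zero =>
    intro j hf hlt
    rw [runEnd] at hlt ⊢
    omega
  | succ f ih =>
    intro j hf hlt
    rw [runEnd] at hlt ⊢
    split at hlt
    · next hc =>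
      rw [if_pos hc]
      exact ih (j+1) (by omega) hlt
    · next hc =>
      rw [if_neg hc]
      intro hh
      exact hc ⟨hlt, hh⟩

theorem runEnd_gt (cs : List Char) (c : Char) (i : Nat) (h : i < cs.length)
    (hc : cs.getD i ' ' = c) : i < runEnd cs c (cs.length - i) i := by
  obtain ⟨g, hg⟩ : ∃ g, cs.length - i = g + 1 := ⟨cs.length - i - 1, by omega⟩
  rw [hg, runEnd, if_pos ⟨h, hc⟩]
  have := runEnd_ge cs c g (i+1)
  omega

-- specF over a run of non-space characters: every index is kept
theorem specF_run_nonspace (cs : List Char) (c : Char) (hc : c ≠ ' ') :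
    ∀ d i, i + d ≤ cs.length → (∀ k, i ≤ k → k < i + d → cs.getD k ' ' = c) →
    specF cs (cs.length - i) i =
      List.replicate d c ++ specF cs (cs.length - (i + d)) (i + d) := by
  intro d
  induction d with
  | zero => intro i _ _; simp
  | succ m ih =>
    intro i hle hall
    have hi : i < cs.length := by omega
    have hci : cs.getD i ' ' = c := hall i (le_refl i) (by omega)
    have hk : keepIdx cs i = true := (keepIdx_iff cs i).mpr (Or.inl (hci ▸ hc))
    obtain ⟨g, hg⟩ : ∃ g, cs.length - i = g + 1 := ⟨cs.length - i - 1, by omega⟩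
    rw [hg, specF_keep cs g i hi hk, hci,
        specF_congr cs g (cs.length - (i+1)) (i+1) (by omega) (by omega),
        ih (i+1) (by omega) (fun k hk1 hk2 => hall k (by omega) (by omega))]
    have he : i + (m + 1) = (i + 1) + m := by omega
    rw [he]
    rfl

-- specF skips a stretch of dropped indices
theorem specF_skip (cs : List Char) :
    ∀ d i, (∀ k, i ≤ k → k < i + d → keepIdx cs k = false) →
    specF cs (cs.length - i) i = specF cs (cs.length - (i + d)) (i + d) := by
  intro d
  induction d with
  | zero => intro i _; rfl
  | succ m ih =>
    intro i hall
    by_cases hi : i < cs.length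
    · have hk : keepIdx cs i = false := hall i (le_refl i) (by omega)
      obtain ⟨g, hg⟩ : ∃ g, cs.length - i = g + 1 := ⟨cs.length - i - 1, by omega⟩
      rw [hg, specF_drop cs g i hi hk,
          specF_congr cs g (cs.length - (i+1)) (i+1) (by omega) (by omega),
          ih (i+1) (fun k hk1 hk2 => hall k (by omega) (by omega))]
      have he : i + (m + 1) = (i + 1) + m := by omega
      rw [he]
    · rw [specF_stop cs _ i hi, specF_stop cs _ (i + (m+1)) (by omega)]

-- B's loop computes specF (from any run start)
theorem ckSpaceB_eq (cs : List Char) :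
    ∀ f i acc, cs.length - i ≤ f →
    (i = 0 ∨ ¬ i < cs.length ∨ cs.getD (i-1) ' ' ≠ cs.getD i ' ') →
    ckSpaceB cs f i acc = acc ++ specF cs (cs.length - i) i := by
  intro f
  induction f with
  | zero =>
    intro i acc hf _
    rw [ckSpaceB, specF_stop cs _ i (by omega), List.append_nil]
  | succ f ih =>
    intro i acc hf hstart
    by_cases h : i < cs.length
    · rw [ckSpaceB, if_pos h]
      set c := cs.getD i ' ' with hc
      set j := runEnd cs c (cs.length - i) i with hj
      have hji : i < j := runEnd_gt cs c i h rfl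
      have hjn : j ≤ cs.length := runEnd_le cs c (cs.length - i) i (by omega)
      have hmem : ∀ k, i ≤ k → k < j → cs.getD k ' ' = c := runEnd_mem cs c (cs.length - i) i
      have hstop : j < cs.length → cs.getD j ' ' ≠ c :=
        runEnd_stop cs c (cs.length - i) i (le_refl _)
      have hnext : j = 0 ∨ ¬ j < cs.length ∨ cs.getD (j-1) ' ' ≠ cs.getD j ' ' := by
        by_cases hjl : j < cs.length
        · right; right
          rw [hmem (j-1) (by omega) (by omega)]
          exact fun hh => hstop hjl hh.symm
        · right; left; exact hjl
      rw [ih j _ (by omega) hnext]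
      by_cases hsp : c = ' '
      · rw [if_neg (by simp [hsp])]
        by_cases hkeep : j - i = 1 ∧ 0 < i ∧ j < cs.length
        · rw [if_pos hkeep]
          have hij : j = i + 1 := by omega
          have hk : keepIdx cs i = true := by
            rw [keepIdx_iff]; right
            refine ⟨hkeep.2.1, by omega, ?_, ?_⟩
            · rcases hstart with h' | h' | h'
              · omega
              · exact absurd h h'
              · exact fun hh => h' (hh.trans hsp.symm)
            · have hst := hstop hkeep.2.2
              rw [hij] at hst
              exact fun hh => hst (hh.trans hsp.symm)
          obtain ⟨g, hg⟩ : ∃ g, cs.length - i = g + 1 := ⟨cs.length - i - 1, by omega⟩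
          rw [hg, specF_keep cs g i h hk,
              specF_congr cs g (cs.length - j) (i+1) (by omega) (by omega)]
          rw [show cs.getD i ' ' = ' ' from hsp, hij]
          simp
        · rw [if_neg hkeep]
          have hall : ∀ k, i ≤ k → k < i + (j - i) → keepIdx cs k = false := by
            intro k hk1 hk2
            have hk2' : k < j := by omega
            rw [keepIdx_false_iff]; push_neg
            constructor
            · rw [hmem k hk1 hk2']; exact hsp
            · intro hk0 hkl hp
              by_cases hin : k + 1 < j
              · rw [hmem (k+1) (by omega) hin]; exact hsp
              · exfalso
                by_cases hpr : i < k
                · exact hp (by rw [hmem (k-1) (by omega) (by omega)]; exact hsp)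
                · exact hkeep ⟨by omega, by omega, by omega⟩
          rw [specF_skip cs (j - i) i hall]
          have he : i + (j - i) = j := by omega
          rw [he]
      · rw [if_pos hsp,
            specF_run_nonspace cs c hsp (j - i) i (by omega)
              (fun k hk1 hk2 => hmem k hk1 (by omega))]
        have he : i + (j - i) = j := by omega
        rw [he, List.append_assoc]
    · rw [ckSpaceB, if_neg h, specF_stop cs _ i h, List.append_nil]

-- ===== VERDICT (by name: the statement is the Claim_ definition above) =====
theorem ckSpace_spec : Claim_equal_ckSpace := by
  intro data _
  unfold Spec_ckSpace ckSpace ckSpace_alt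
  rw [ckSpaceA_eq data.toList data.toList.length 0 [] (by omega),
      ckSpaceB_eq data.toList data.toList.length 0 [] (by omega) (Or.inl rfl),
      Nat.sub_zero]
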